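-- pv_equiv track=rewrite | github.com/RVH-CR/intense-qc | qc.py | getDryPeriods
-- ===== SOURCE A (Python) =====
-- def getDryPeriods(vals):
--
--     startIndexList = []
--     durationList = []
--
--     dryFlag = 0
--     hoursTicker = 0
--
--     for i in range(len(vals)):
--         v = vals[i]
--
--
--         if v == 0:
--             if dryFlag == 0:
--                 startIndexList.append(i)
--
--             hoursTicker +=1
--             dryFlag = 1
--             if i == len(vals)-1:
--                 durationList.append(hoursTicker)
--
--         else:
--             if dryFlag == 1:
--                 durationList.append(hoursTicker)
--
--             hoursTicker = 0
--             dryFlag = 0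
--
--         if i == len(vals):
--             if dryFlag == 1:
--                 durationList.append(hoursTicker)
--
--     return [startIndexList, durationList]
-- ===== SOURCE B (Python) =====
-- def getDryPeriods(vals):
--     startIndexList = []
--     durationList = []
--     n = len(vals)
--     i = 0
--     while i < n:
--         if vals[i] == 0:
--             j = i + 1
--             while j < n and vals[j] == 0:
--                 j += 1
--             startIndexList.append(i)
--             durationList.append(j - i)
--             i = j
--         else:
--             i += 1
--     return [startIndexList, durationList]
-- ===== Notes on version B (the rewrite author's own statement) =====
-- stated objective: simpler
-- what changed: Replaced the per-element dryFlag/hoursTicker state machine (with its last-index special case and dead end-of-loop branch) by a run-consuming scan: on meeting a zero, an inner loop consumes the whole zero run at once and emits its start and length.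
import Mathlib
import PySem

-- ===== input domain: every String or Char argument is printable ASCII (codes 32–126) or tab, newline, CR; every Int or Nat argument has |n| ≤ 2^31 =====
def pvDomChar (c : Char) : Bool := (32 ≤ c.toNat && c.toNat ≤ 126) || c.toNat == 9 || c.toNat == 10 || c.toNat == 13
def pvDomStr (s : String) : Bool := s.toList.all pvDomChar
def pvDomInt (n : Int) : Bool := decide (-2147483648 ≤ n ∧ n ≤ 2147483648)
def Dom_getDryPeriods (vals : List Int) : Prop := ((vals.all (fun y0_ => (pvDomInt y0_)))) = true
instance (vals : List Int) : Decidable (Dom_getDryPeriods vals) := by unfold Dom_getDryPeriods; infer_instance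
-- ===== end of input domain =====

-- B replaces A's dryFlag/hoursTicker state machine by a run-consuming scan (simpler decomposition, same O(n) cost).

-- ===== PORT A =====
-- loop body over range(len(vals)); state = (startIndexList, durationList, dryFlag, hoursTicker).
-- vals[i] is ported via pyGetD (exact here: i always in range 0..len-1).
def getDryPeriodsGo (vals : List Int) (n : Int) :
    List Int → (List Int × List Int × Int × Int) → List Int × List Int × Int × Int
  | [], st => st
  | i :: is, (startIndexList, durationList, dryFlag, hoursTicker) =>
      let v := PySem.List.pyGetD vals i 0
      let st :=
        if v = 0 then
          let startIndexList := if dryFlag = 0 then startIndexList ++ [i] else startIndexList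
          let hoursTicker := hoursTicker + 1
          let dryFlag : Int := 1
          let durationList := if i = n - 1 then durationList ++ [hoursTicker] else durationList
          (startIndexList, durationList, dryFlag, hoursTicker)
        else
          let durationList := if dryFlag = 1 then durationList ++ [hoursTicker] else durationList
          (startIndexList, durationList, (0 : Int), (0 : Int))
      -- A's (dead) trailing branch: if i == len(vals): ...
      let st := if i = n then
          (if st.2.2.1 = 1 then (st.1, st.2.1 ++ [st.2.2.2], st.2.2.1, st.2.2.2) else st)
        else st
      getDryPeriodsGo vals n is st

def getDryPeriods (vals : List Int) : List (List Int) :=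
  let n : Int := vals.length
  let st := getDryPeriodsGo vals n (PySem.List.pyRange 0 n 1) ([], [], 0, 0)
  [st.1, st.2.1]

-- ===== PORT B =====
-- inner while loop of Source B: count of leading zeros and the rest of the list
def zspan : List Int → Int × List Int
  | [] => (0, [])
  | v :: rest => if v = 0 then ((zspan rest).1 + 1, (zspan rest).2) else (0, v :: rest)

lemma zspan_length_le (xs : List Int) : (zspan xs).2.length ≤ xs.length := by
  induction xs with
  | nil => simp [zspan]
  | cons v rest ih =>
    by_cases h : v = 0 <;> simp [zspan, h]
    omega

-- outer while loop of Source B: emit (start index, run length) for each zero run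
def getDryPeriodsRuns (i : Int) : List Int → List (Int × Int)
  | [] => []
  | v :: rest =>
      if v = 0 then
        (i, (zspan rest).1 + 1) :: getDryPeriodsRuns (i + (zspan rest).1 + 1) (zspan rest).2
      else getDryPeriodsRuns (i + 1) rest
termination_by l => l.length
decreasing_by
  · exact Nat.lt_succ_of_le (zspan_length_le rest)
  · exact Nat.lt_succ_self _

def getDryPeriods_alt (vals : List Int) : List (List Int) :=
  let runs := getDryPeriodsRuns 0 vals
  [runs.map Prod.fst, runs.map Prod.snd]

-- ===== PRECONDITION & SPEC =====
def Spec_getDryPeriods (vals : List Int) (out : List (List Int)) : Prop := out = getDryPeriods_alt vals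
instance (vals : List Int) (out : List (List Int)) : Decidable (Spec_getDryPeriods vals out) := by unfold Spec_getDryPeriods; infer_instance

-- ===== CLAIM (what is proved, stated in full; the proofs are below) =====
def Claim_equal_getDryPeriods : Prop := ∀ (vals : List Int), Dom_getDryPeriods vals → Spec_getDryPeriods vals (getDryPeriods vals)

-- ===== LEMMAS AND PROOFS =====

-- Invariant of A's loop, stated against B's run decomposition.
lemma getDryPeriodsGo_spec (vals : List Int) : ∀ (s : List Int) (i : Nat) (S D : List Int) (t f : Int),
    vals.drop i = s → (i : Int) + s.length = (vals.length : Int) →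
    ((f = 0 ∧ t = 0) ∨ (f = 1 ∧ s ≠ [])) →
    ((getDryPeriodsGo vals (vals.length : Int) (PySem.List.pyRange (i : Int) (vals.length : Int) 1) (S, D, f, t)).1,
     (getDryPeriodsGo vals (vals.length : Int) (PySem.List.pyRange (i : Int) (vals.length : Int) 1) (S, D, f, t)).2.1) =
    (if f = 1 then
      (S ++ (getDryPeriodsRuns ((i : Int) + (zspan s).1) (zspan s).2).map Prod.fst,
       D ++ (t + (zspan s).1) :: (getDryPeriodsRuns ((i : Int) + (zspan s).1) (zspan s).2).map Prod.snd)
    else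
      (S ++ (getDryPeriodsRuns (i : Int) s).map Prod.fst,
       D ++ (getDryPeriodsRuns (i : Int) s).map Prod.snd)) := by
  intro s
  induction s with
  | nil =>
    intro i S D t f hdrop hlen hf
    rcases hf with ⟨hf, ht⟩ | ⟨hf, hne⟩
    · subst hf ht
      have hi : (i : Int) = (vals.length : Int) := by
        simp only [List.length_nil] at hlen; push_cast at hlen; omega
      rw [hi, PySem.List.pyRange_one_eq_nil (le_refl _)]
      simp [getDryPeriodsGo, getDryPeriodsRuns]
    · exact absurd rfl hne
  | cons v rest ih =>
    intro i S D t f hdrop hlen hf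
    have hn01 : ¬ ((0:Int) = 1) := by decide
    have hn10 : ¬ ((1:Int) = 0) := by decide
    have hlen' : (i : Int) + (rest.length : Int) + 1 = (vals.length : Int) := by
      simp only [List.length_cons] at hlen; push_cast at hlen; omega
    have hlt : i < vals.length := by omega
    have hrange : PySem.List.pyRange (i : Int) (vals.length : Int) 1
        = (i : Int) :: PySem.List.pyRange ((i : Int) + 1) (vals.length : Int) 1 :=
      PySem.List.pyRange_one_cons (by omega)
    have hv : PySem.List.pyGetD vals (i : Int) 0 = v := by
      have h0 : vals[i]? = some v := by
        rw [← List.head?_drop, hdrop]; rfl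
      rw [PySem.List.pyGetD_natCast]
      simp [List.getD, h0]
    have hdrop1 : vals.drop (i + 1) = rest := by
      have h1 := congrArg (List.drop 1) hdrop
      simpa [List.drop_drop, Nat.add_comm] using h1
    have hlen1 : ((i + 1 : Nat) : Int) + (rest.length : Int) = (vals.length : Int) := by
      push_cast; omega
    have hine : (i : Int) ≠ (vals.length : Int) := by omega
    rw [hrange]
    by_cases hz : v = 0
    · subst hz
      by_cases hrest : rest = []
      · -- the zero run ends at the last element of vals
        have hr0 : rest.length = 0 := by rw [hrest]; rfl
        have hilast : (i : Int) = (vals.length : Int) - 1 := by omega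
        have hnext : PySem.List.pyRange ((i : Int) + 1) (vals.length : Int) 1 = [] :=
          PySem.List.pyRange_one_eq_nil (by omega)
        subst hrest
        rcases hf with ⟨hf, ht⟩ | ⟨hf, -⟩
        · subst hf ht
          simp only [getDryPeriodsGo, hv, if_pos rfl, if_true, if_false, if_neg hn01, if_neg hn10, if_pos hilast, if_neg hine, zero_add]
          rw [hnext]
          simp [getDryPeriodsGo, getDryPeriodsRuns, zspan]
        · subst hf
          simp only [getDryPeriodsGo, hv, if_pos rfl, if_true, if_false, if_neg hn01, if_neg hn10, if_pos hilast, if_neg hine]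
          rw [hnext]
          simp [getDryPeriodsGo, getDryPeriodsRuns, zspan]
      · -- the zero run continues past i
        have hr0 : 0 < rest.length := List.length_pos_iff.mpr hrest
        have hnotlast : (i : Int) ≠ (vals.length : Int) - 1 := by omega
        rcases hf with ⟨hf, ht⟩ | ⟨hf, -⟩
        · subst hf ht
          simp only [getDryPeriodsGo, hv, if_pos rfl, if_true, if_false, if_neg hn01, if_neg hn10, if_neg hnotlast, if_neg hine, zero_add]
          have hIH := ih (i + 1) (S ++ [(i : Int)]) D 1 1 hdrop1 hlen1 (Or.inr ⟨rfl, hrest⟩)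
          simp only [if_pos rfl, if_true, if_false, if_neg hn01] at hIH
          push_cast at hIH
          rw [hIH]
          have e1 : (i : Int) + 1 + (zspan rest).1 = (i : Int) + (zspan rest).1 + 1 := by ring
          have e2 : (1 : Int) + (zspan rest).1 = (zspan rest).1 + 1 := by ring
          rw [e1, e2]
          simp only [getDryPeriodsRuns, if_pos rfl, if_true, if_false, if_neg hn01, if_neg hn10, if_neg hnotlast]
          simp
        · subst hf
          simp only [getDryPeriodsGo, hv, if_pos rfl, if_true, if_false, if_neg hn01, if_neg hn10, if_neg hnotlast, if_neg hine]
          have hIH := ih (i + 1) S D (t + 1) 1 hdrop1 hlen1 (Or.inr ⟨rfl, hrest⟩)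
          simp only [if_pos rfl, if_true, if_false, if_neg hn01] at hIH
          push_cast at hIH
          rw [hIH]
          have e1 : (i : Int) + 1 + (zspan rest).1 = (i : Int) + ((zspan rest).1 + 1) := by ring
          have e2 : t + 1 + (zspan rest).1 = t + ((zspan rest).1 + 1) := by ring
          rw [e1, e2]
          simp only [zspan, if_pos rfl, if_true, if_false]
    · -- nonzero element
      rcases hf with ⟨hf, ht⟩ | ⟨hf, -⟩
      · subst hf ht
        simp only [getDryPeriodsGo, hv, if_neg hz, if_pos rfl, if_true, if_false, if_neg hn01, if_neg hn10, if_neg hine]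
        have hIH := ih (i + 1) S D 0 0 hdrop1 hlen1 (Or.inl ⟨rfl, rfl⟩)
        simp only [if_pos rfl, if_true, if_false, if_neg hn01] at hIH
        push_cast at hIH
        rw [hIH]
        simp only [getDryPeriodsRuns, if_neg hz]
      · subst hf
        simp only [getDryPeriodsGo, hv, if_neg hz, if_pos rfl, if_true, if_false, if_neg hn01, if_neg hn10, if_neg hine]
        have hIH := ih (i + 1) S (D ++ [t]) 0 0 hdrop1 hlen1 (Or.inl ⟨rfl, rfl⟩)
        simp only [if_pos rfl, if_true, if_false, if_neg hn01] at hIH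
        push_cast at hIH
        rw [hIH]
        simp only [zspan, if_neg hz, getDryPeriodsRuns]
        simp

-- ===== VERDICT (by name: the statement is the Claim_ definition above) =====
theorem getDryPeriods_spec : Claim_equal_getDryPeriods := by
  intro vals _
  have h := getDryPeriodsGo_spec vals vals 0 [] [] 0 0 (by simp) (by simp) (Or.inl ⟨rfl, rfl⟩)
  rw [if_neg (by decide : ¬ ((0 : Int) = 1))] at h
  simp only [Nat.cast_zero, List.nil_append, Prod.mk.injEq] at h
  show getDryPeriods vals = getDryPeriods_alt vals
  unfold getDryPeriods getDryPeriods_alt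
  exact congrArg₂ (fun a b => [a, b]) h.1 h.2
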